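-- pv_equiv track=rewrite | github.com/huangjimmy/gnucash-plaintext | tests/integration/test_full_conversion_chain.py | parse_plaintext_structure
-- ===== SOURCE A (Python) =====
-- def parse_plaintext_structure(content: str) -> dict:
--     """
--     Parse plaintext into structured sections.
--
--     Returns dict with:
--         'commodities': set of commodity declarations (without dates)
--         'accounts': set of account declarations (without dates/GUIDs)
--         'transactions': set of transaction blocks (without GUIDs)
--     """
--     lines = content.split('\n')
--
--     commodities = set()
--     accounts = set()
--     transactions = []
--
--     i = 0
--     while i < len(lines):
--         line = lines[i].strip()
--
--         # Skip empty lines and comments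
--         if not line or line.startswith(';'):
--             i += 1
--             continue
--
--         # Commodity declaration
--         if ' commodity ' in line:
--             # Collect commodity and metadata (skip date)
--             commodity_lines = [' '.join(line.split()[2:])]  # Skip date and 'commodity'
--             i += 1
--             while i < len(lines) and lines[i].startswith('\t'):
--                 commodity_lines.append(lines[i].strip())
--                 i += 1
--             commodities.add('\n'.join(sorted(commodity_lines)))
--             continue
--
--         # Account declaration
--         if ' open ' in line:
--             # Collect account and metadata (skip date and GUID)
--             account_name = ' '.join(line.split()[2:])  # Skip date and 'open'
--             account_lines = [account_name]
--             i += 1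
--             while i < len(lines) and lines[i].startswith('\t'):
--                 meta = lines[i].strip()
--                 if 'guid:' not in meta.lower():  # Skip GUID
--                     account_lines.append(meta)
--                 i += 1
--             accounts.add('\n'.join(sorted(account_lines)))
--             continue
--
--         # Transaction
--         if line and line[0].isdigit() and ' * ' in line:
--             # Collect transaction (skip GUIDs and normalize currency metadata)
--             tx_lines = []
--             i += 1
--             while i < len(lines) and (lines[i].startswith('\t') or lines[i].strip() == ''):
--                 meta = lines[i].strip()
--                 # Skip GUIDs and implicit currency.namespace for CURRENCY
--                 if meta and 'guid:' not in meta.lower() and 'currency.namespace: "CURRENCY"' not in meta: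
--                     tx_lines.append(lines[i].rstrip())
--                 i += 1
--             transactions.append('\n'.join(tx_lines))
--             continue
--
--         i += 1
--
--     return {
--         'commodities': commodities,
--         'accounts': accounts,
--         'transactions': set(transactions)
--     }
-- ===== SOURCE B (Python) =====
-- def parse_plaintext_structure(content: str) -> dict:
--     lines = content.split('\n')
--
--     # Pass 1: segmentation into (header, raw continuation lines) blocks.
--     blocks = []
--     j = 0
--     n = len(lines)
--     while j < n:
--         line = lines[j].strip()
--         j += 1
--         if not line or line.startswith(';'):
--             continue
--         com = ' commodity ' in line
--         opn = ' open ' in line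
--         tx = line[0].isdigit() and ' * ' in line
--         if not (com or opn or tx):
--             continue
--         greedy = not com and not opn  # transaction blocks also absorb blank lines
--         body = []
--         while j < n and (lines[j].startswith('\t') or (greedy and lines[j].strip() == '')):
--             body.append(lines[j])
--             j += 1
--         blocks.append((line, body))
--
--     # Pass 2: classification / field stripping.
--     commodities = set()
--     accounts = set()
--     transactions = []
--     for line, body in blocks:
--         if ' commodity ' in line:
--             commodities.add('\n'.join(sorted(
--                 [' '.join(line.split()[2:])] + [b.strip() for b in body])))
--         elif ' open ' in line:
--             accounts.add('\n'.join(sorted(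
--                 [' '.join(line.split()[2:])]
--                 + [b.strip() for b in body if 'guid:' not in b.strip().lower()])))
--         else:
--             transactions.append('\n'.join(
--                 b.rstrip() for b in body
--                 if b.strip() and 'guid:' not in b.strip().lower()
--                 and 'currency.namespace: "CURRENCY"' not in b.strip()))
--
--     return {
--         'commodities': commodities,
--         'accounts': accounts,
--         'transactions': set(transactions),
--     }
-- ===== Notes on version B (the rewrite author's own statement) =====
-- stated objective: alternative
-- what changed: A's single while-loop state machine with three inline inner whiles is replaced by a two-pass design: a segmentation pass that cuts the lines into (header, continuation-run) blocks (transaction blocks absorbing blank lines, commodity/account blocks stopping at the first non-tab line), followed by a separate classification fold that applies the field-stripping/filtering rules per block.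
import Mathlib
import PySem

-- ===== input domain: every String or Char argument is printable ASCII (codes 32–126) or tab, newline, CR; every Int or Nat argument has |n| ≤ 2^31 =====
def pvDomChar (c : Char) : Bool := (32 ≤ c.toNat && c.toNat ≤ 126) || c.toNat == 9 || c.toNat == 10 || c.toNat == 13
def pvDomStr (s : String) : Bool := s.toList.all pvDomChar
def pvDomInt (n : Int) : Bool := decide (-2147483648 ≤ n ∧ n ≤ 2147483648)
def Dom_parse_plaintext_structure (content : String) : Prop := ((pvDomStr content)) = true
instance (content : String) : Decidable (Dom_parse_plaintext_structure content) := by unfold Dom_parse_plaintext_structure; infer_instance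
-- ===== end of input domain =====

-- B replaces A's single state-machine loop by a segmentation pass producing (header, body) blocks
-- and a separate classification fold over the blocks (objective: alternative decomposition, same cost).

-- ===== PORT A =====
-- line[0].isdigit() on a (truthy) line
def pvHeadDigit (line : String) : Bool :=
  match line.toList with
  | c :: _ => PySem.Chars.isdigit c
  | [] => false

-- inner while of the commodity branch: collect stripped '\t'-lines, return (collected, rest)
def pvCollectComm : List String → List String × List String
  | [] => ([], [])
  | l :: rest =>
    if PySem.Str.startswith l "\t" then
      (PySem.Str.strip l :: (pvCollectComm rest).1, (pvCollectComm rest).2)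
    else ([], l :: rest)

-- inner while of the account branch: collect stripped '\t'-lines without 'guid:' (case-insensitive)
def pvCollectAcct : List String → List String × List String
  | [] => ([], [])
  | l :: rest =>
    if PySem.Str.startswith l "\t" then
      (if PySem.Str.isIn "guid:" (PySem.Str.lower (PySem.Str.strip l)) then
         (pvCollectAcct rest).1
       else PySem.Str.strip l :: (pvCollectAcct rest).1,
       (pvCollectAcct rest).2)
    else ([], l :: rest)

-- inner while of the transaction branch: '\t'-lines and blank lines; keep rstripped lines passing the filter
def pvCollectTx : List String → List String × List String
  | [] => ([], [])
  | l :: rest =>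
    if PySem.Str.startswith l "\t" || PySem.Str.strip l == "" then
      (if !(PySem.Str.strip l == "") &&
          !PySem.Str.isIn "guid:" (PySem.Str.lower (PySem.Str.strip l)) &&
          !PySem.Str.isIn "currency.namespace: \"CURRENCY\"" (PySem.Str.strip l) then
         PySem.Str.rstrip l :: (pvCollectTx rest).1
       else (pvCollectTx rest).1,
       (pvCollectTx rest).2)
    else ([], l :: rest)

theorem pvCollectComm_snd_len (ls : List String) : (pvCollectComm ls).2.length ≤ ls.length := by
  induction ls with
  | nil => simp [pvCollectComm]
  | cons l rest ih => simp only [pvCollectComm]; split <;> simp <;> omega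

theorem pvCollectAcct_snd_len (ls : List String) : (pvCollectAcct ls).2.length ≤ ls.length := by
  induction ls with
  | nil => simp [pvCollectAcct]
  | cons l rest ih => simp only [pvCollectAcct]; split <;> simp <;> omega

theorem pvCollectTx_snd_len (ls : List String) : (pvCollectTx ls).2.length ≤ ls.length := by
  induction ls with
  | nil => simp [pvCollectTx]
  | cons l rest ih => simp only [pvCollectTx]; split <;> simp <;> omega

-- A's outer while loop
def pvALoop : List String → PySem.Set String → PySem.Set String → List String →
    PySem.Set String × PySem.Set String × List String
  | [], c, a, t => (c, a, t)
  | l :: rest, c, a, t =>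
    if PySem.Str.strip l == "" || PySem.Str.startswith (PySem.Str.strip l) ";" then
      pvALoop rest c a t
    else if PySem.Str.isIn " commodity " (PySem.Str.strip l) then
      pvALoop (pvCollectComm rest).2
        (PySem.Set.add c (PySem.Str.join "\n" (PySem.List.sorted
          (PySem.Str.join " " ((PySem.Str.split₀ (PySem.Str.strip l)).drop 2) ::
            (pvCollectComm rest).1) (fun x => x) false)))
        a t
    else if PySem.Str.isIn " open " (PySem.Str.strip l) then
      pvALoop (pvCollectAcct rest).2 c
        (PySem.Set.add a (PySem.Str.join "\n" (PySem.List.sorted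
          (PySem.Str.join " " ((PySem.Str.split₀ (PySem.Str.strip l)).drop 2) ::
            (pvCollectAcct rest).1) (fun x => x) false)))
        t
    else if !(PySem.Str.strip l == "") && pvHeadDigit (PySem.Str.strip l) &&
            PySem.Str.isIn " * " (PySem.Str.strip l) then
      pvALoop (pvCollectTx rest).2 c a (t ++ [PySem.Str.join "\n" (pvCollectTx rest).1])
    else
      pvALoop rest c a t
termination_by ls => ls.length
decreasing_by all_goals
  (simp only [List.span_eq_takeWhile_dropWhile, List.length_cons]
   first
     | exact Nat.lt_succ_of_le (pvCollectComm_snd_len rest)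
     | exact Nat.lt_succ_of_le (pvCollectAcct_snd_len rest)
     | exact Nat.lt_succ_of_le (pvCollectTx_snd_len rest)
     | omega)

def parse_plaintext_structure (content : String) : List (String × List String) :=
  let lines := (PySem.Str.split? content "\n").getD []
  let r := pvALoop lines PySem.Set.empty PySem.Set.empty []
  [("commodities", r.1), ("accounts", r.2.1), ("transactions", PySem.Set.ofList r.2.2)]

-- ===== PORT B =====
-- pass 1: segmentation into (stripped header, raw continuation lines) blocks
def pvSegment : List String → List (String × List String)
  | [] => []
  | l :: rest =>
    if PySem.Str.strip l == "" || PySem.Str.startswith (PySem.Str.strip l) ";" then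
      pvSegment rest
    else if !(PySem.Str.isIn " commodity " (PySem.Str.strip l) ||
              PySem.Str.isIn " open " (PySem.Str.strip l) ||
              (pvHeadDigit (PySem.Str.strip l) && PySem.Str.isIn " * " (PySem.Str.strip l))) then
      pvSegment rest
    else
      (PySem.Str.strip l,
        (rest.span (fun s => PySem.Str.startswith s "\t" ||
          ((!PySem.Str.isIn " commodity " (PySem.Str.strip l) &&
            !PySem.Str.isIn " open " (PySem.Str.strip l)) && PySem.Str.strip s == ""))).1) ::
      pvSegment (rest.span (fun s => PySem.Str.startswith s "\t" ||
          ((!PySem.Str.isIn " commodity " (PySem.Str.strip l) &&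
            !PySem.Str.isIn " open " (PySem.Str.strip l)) && PySem.Str.strip s == ""))).2
termination_by ls => ls.length
decreasing_by all_goals
  (simp only [List.span_eq_takeWhile_dropWhile, List.length_cons]
   first
     | exact Nat.lt_succ_of_le (List.length_dropWhile_le _ _)
     | omega)

-- pass 2: classification of one block
def pvStep (s : PySem.Set String × PySem.Set String × List String) (b : String × List String) :
    PySem.Set String × PySem.Set String × List String :=
  if PySem.Str.isIn " commodity " b.1 then
    (PySem.Set.add s.1 (PySem.Str.join "\n" (PySem.List.sorted
      (PySem.Str.join " " ((PySem.Str.split₀ b.1).drop 2) :: b.2.map PySem.Str.strip)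
      (fun x => x) false)), s.2.1, s.2.2)
  else if PySem.Str.isIn " open " b.1 then
    (s.1, PySem.Set.add s.2.1 (PySem.Str.join "\n" (PySem.List.sorted
      (PySem.Str.join " " ((PySem.Str.split₀ b.1).drop 2) ::
        (b.2.filter (fun x => !PySem.Str.isIn "guid:" (PySem.Str.lower (PySem.Str.strip x)))).map
          PySem.Str.strip)
      (fun x => x) false)), s.2.2)
  else
    (s.1, s.2.1, s.2.2 ++ [PySem.Str.join "\n"
      ((b.2.filter (fun x => !(PySem.Str.strip x == "") &&
          !PySem.Str.isIn "guid:" (PySem.Str.lower (PySem.Str.strip x)) &&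
          !PySem.Str.isIn "currency.namespace: \"CURRENCY\"" (PySem.Str.strip x))).map
        PySem.Str.rstrip)])

def parse_plaintext_structure_alt (content : String) : List (String × List String) :=
  let lines := (PySem.Str.split? content "\n").getD []
  let r := (pvSegment lines).foldl pvStep (PySem.Set.empty, PySem.Set.empty, [])
  [("commodities", r.1), ("accounts", r.2.1), ("transactions", PySem.Set.ofList r.2.2)]

-- ===== PRECONDITION & SPEC =====
def Spec_parse_plaintext_structure (content : String) (out : List (String × List String)) : Prop := out = parse_plaintext_structure_alt content
instance (content : String) (out : List (String × List String)) : Decidable (Spec_parse_plaintext_structure content out) := by unfold Spec_parse_plaintext_structure; infer_instance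

-- ===== CLAIM (what is proved, stated in full; the proofs are below) =====
def Claim_equal_parse_plaintext_structure : Prop := ∀ (content : String), Dom_parse_plaintext_structure content → Spec_parse_plaintext_structure content (parse_plaintext_structure content)

-- ===== LEMMAS AND PROOFS =====

theorem pvCollectComm_eq (ls : List String) :
    pvCollectComm ls =
      ((ls.takeWhile (fun s => PySem.Str.startswith s "\t")).map PySem.Str.strip,
        ls.dropWhile (fun s => PySem.Str.startswith s "\t")) := by
  induction ls with
  | nil => simp [pvCollectComm]
  | cons l rest ih =>
    by_cases h : PySem.Str.startswith l "\t" = true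
    · simp at h
      simp [pvCollectComm, List.takeWhile_cons, List.dropWhile_cons, h, ih]
    · simp at h
      simp [pvCollectComm, List.takeWhile_cons, List.dropWhile_cons, h]

theorem pvCollectAcct_eq (ls : List String) :
    pvCollectAcct ls =
      (((ls.takeWhile (fun s => PySem.Str.startswith s "\t")).filter
          (fun x => !PySem.Str.isIn "guid:" (PySem.Str.lower (PySem.Str.strip x)))).map
        PySem.Str.strip,
        ls.dropWhile (fun s => PySem.Str.startswith s "\t")) := by
  induction ls with
  | nil => simp [pvCollectAcct]
  | cons l rest ih =>
    by_cases h : PySem.Str.startswith l "\t" = true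
    · by_cases hg : PySem.Str.isIn "guid:" (PySem.Str.lower (PySem.Str.strip l)) = true
      · simp at h hg
        simp [pvCollectAcct, List.takeWhile_cons, List.dropWhile_cons, List.filter_cons, h, hg, ih]
      · simp at h hg
        simp [pvCollectAcct, List.takeWhile_cons, List.dropWhile_cons, List.filter_cons, h, hg, ih]
    · simp at h
      simp [pvCollectAcct, List.takeWhile_cons, List.dropWhile_cons, h]

theorem pvCollectTx_eq (ls : List String) :
    pvCollectTx ls =
      (((ls.takeWhile (fun s => PySem.Str.startswith s "\t" || PySem.Str.strip s == "")).filter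
          (fun x => !(PySem.Str.strip x == "") &&
            !PySem.Str.isIn "guid:" (PySem.Str.lower (PySem.Str.strip x)) &&
            !PySem.Str.isIn "currency.namespace: \"CURRENCY\"" (PySem.Str.strip x))).map
        PySem.Str.rstrip,
        ls.dropWhile (fun s => PySem.Str.startswith s "\t" || PySem.Str.strip s == "")) := by
  induction ls with
  | nil => simp [pvCollectTx]
  | cons l rest ih =>
    by_cases h : (PySem.Str.startswith l "\t" || PySem.Str.strip l == "") = true
    · simp at h
      by_cases he : PySem.Str.strip l = ""
      · simp [pvCollectTx, List.takeWhile_cons, List.dropWhile_cons, List.filter_cons, h, he, ih]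
      · replace h := h.resolve_right he
        by_cases hg : PySem.Str.isIn "guid:" (PySem.Str.lower (PySem.Str.strip l)) = true
        · simp at hg
          simp [pvCollectTx, List.takeWhile_cons, List.dropWhile_cons, List.filter_cons,
            h, he, hg, ih]
        · simp at hg
          by_cases hcu : PySem.Str.isIn "currency.namespace: \"CURRENCY\""
              (PySem.Str.strip l) = true
          · simp at hcu
            simp [pvCollectTx, List.takeWhile_cons, List.dropWhile_cons, List.filter_cons,
              h, he, hg, hcu, ih]
          · simp at hcu
            simp [pvCollectTx, List.takeWhile_cons, List.dropWhile_cons, List.filter_cons,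
              h, he, hg, hcu, ih]
    · simp at h
      simp [pvCollectTx, List.takeWhile_cons, List.dropWhile_cons, h]

-- the heart: A's loop equals B's classification fold over B's segmentation
theorem pvLoop_eq_fold (n : Nat) : ∀ ls : List String, ls.length ≤ n →
    ∀ c a t, pvALoop ls c a t = (pvSegment ls).foldl pvStep (c, a, t) := by
  induction n with
  | zero =>
    intro ls hl c a t
    have : ls = [] := List.eq_nil_of_length_eq_zero (Nat.le_zero.mp hl)
    subst this; simp [pvALoop, pvSegment]
  | succ n ih =>
    intro ls hl c a t
    match ls with
    | [] => simp [pvALoop, pvSegment]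
    | l :: rest =>
      have hr : rest.length ≤ n := by simp at hl; omega
      by_cases h0 : (PySem.Str.strip l == "" || PySem.Str.startswith (PySem.Str.strip l) ";") = true
      · rw [pvALoop, pvSegment, if_pos h0, if_pos h0]
        exact ih rest hr c a t
      · by_cases hc : PySem.Str.isIn " commodity " (PySem.Str.strip l) = true
        · rw [pvALoop, pvSegment, if_neg h0, if_neg h0, if_pos hc]
          rw [if_neg (by simp only [hc, Bool.true_or, Bool.not_true]; simp)]
          rw [pvCollectComm_eq]
          try dsimp only
          simp only [hc, Bool.not_true, Bool.false_and, Bool.and_false, Bool.false_or,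
            Bool.or_false, List.span_eq_takeWhile_dropWhile, List.foldl_cons]
          try dsimp only
          have hd : (rest.dropWhile (fun s => PySem.Str.startswith s "\t")).length ≤ n :=
            le_trans (List.length_dropWhile_le _ rest) hr
          rw [ih _ hd]
          dsimp only [pvStep]
          rw [if_pos hc]
        · have hc' : PySem.Str.isIn " commodity " (PySem.Str.strip l) = false :=
            Bool.eq_false_iff.mpr hc
          by_cases ho : PySem.Str.isIn " open " (PySem.Str.strip l) = true
          · rw [pvALoop, pvSegment, if_neg h0, if_neg h0, if_neg hc, if_pos ho]
            rw [if_neg (by simp only [ho, Bool.true_or, Bool.or_true, Bool.not_true]; simp)]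
            rw [pvCollectAcct_eq]
            try dsimp only
            simp only [hc', ho, Bool.not_true, Bool.not_false, Bool.true_and, Bool.false_and,
              Bool.and_false, Bool.or_false, List.span_eq_takeWhile_dropWhile, List.foldl_cons]
            try dsimp only
            have hd : (rest.dropWhile (fun s => PySem.Str.startswith s "\t")).length ≤ n :=
              le_trans (List.length_dropWhile_le _ rest) hr
            rw [ih _ hd]
            dsimp only [pvStep]
            rw [if_neg hc, if_pos ho]
          · have ho' : PySem.Str.isIn " open " (PySem.Str.strip l) = false :=
              Bool.eq_false_iff.mpr ho
            have hne : (PySem.Str.strip l == "") = false := by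
              have h0' := h0
              simp only [Bool.or_eq_true, not_or] at h0'
              exact Bool.eq_false_iff.mpr h0'.1
            by_cases ht : (pvHeadDigit (PySem.Str.strip l) &&
                PySem.Str.isIn " * " (PySem.Str.strip l)) = true
            · have htx : (!(PySem.Str.strip l == "") && pvHeadDigit (PySem.Str.strip l) &&
                  PySem.Str.isIn " * " (PySem.Str.strip l)) = true := by
                rw [hne]
                simp only [Bool.not_false, Bool.true_and]
                exact ht
              rw [pvALoop, pvSegment, if_neg h0, if_neg h0, if_neg hc, if_neg ho, if_pos htx]
              rw [if_neg (by simp only [hc', ho', ht, Bool.false_or, Bool.not_true]; simp)]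
              rw [pvCollectTx_eq]
              try dsimp only
              simp only [hc', ho', Bool.not_false, Bool.true_and,
                List.span_eq_takeWhile_dropWhile, List.foldl_cons]
              try dsimp only
              have hd : (rest.dropWhile (fun s => PySem.Str.startswith s "\t" ||
                  PySem.Str.strip s == "")).length ≤ n :=
                le_trans (List.length_dropWhile_le _ rest) hr
              rw [ih _ hd]
              dsimp only [pvStep]
              rw [if_neg hc, if_neg ho]
            · have ht' : (pvHeadDigit (PySem.Str.strip l) &&
                  PySem.Str.isIn " * " (PySem.Str.strip l)) = false :=
                Bool.eq_false_iff.mpr ht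
              have htx : ¬ ((!(PySem.Str.strip l == "") && pvHeadDigit (PySem.Str.strip l) &&
                  PySem.Str.isIn " * " (PySem.Str.strip l)) = true) := by
                rw [hne]
                simp only [Bool.not_false, Bool.true_and]
                exact ht
              rw [pvALoop, pvSegment, if_neg h0, if_neg h0, if_neg hc, if_neg ho, if_neg htx]
              rw [if_pos (by simp only [hc', ho', ht', Bool.false_or, Bool.not_false])]
              exact ih rest hr c a t

-- ===== VERDICT (by name: the statement is the Claim_ definition above) =====
theorem parse_plaintext_structure_spec : Claim_equal_parse_plaintext_structure := by
  intro content _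
  unfold Spec_parse_plaintext_structure parse_plaintext_structure parse_plaintext_structure_alt
  have h := pvLoop_eq_fold ((PySem.Str.split? content "\n").getD []).length
    ((PySem.Str.split? content "\n").getD []) le_rfl PySem.Set.empty PySem.Set.empty []
  simp only [h]
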